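-- pv_equiv track=rewrite | github.com/LittlePyx/Pi_zaya | ui/refs_renderer.py | _iter_display_math_blocks
-- ===== SOURCE A (Python) =====
-- def _iter_display_math_blocks(md: str) -> list[tuple[int, int, str]]:
--     """
--     Return list of (start_line_idx, end_line_idx_exclusive, inner_text) for $$...$$ blocks.
--     """
--     s = (md or "").replace("\r\n", "\n").replace("\r", "\n")
--     if not s.strip():
--         return []
--     lines = s.split("\n")
--     out: list[tuple[int, int, str]] = []
--     i = 0
--     while i < len(lines):
--         if lines[i].strip() != "$$":
--             i += 1
--             continue
--         j = i + 1
--         buf: list[str] = []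
--         while j < len(lines) and lines[j].strip() != "$$":
--             buf.append(lines[j])
--             j += 1
--         if j < len(lines) and lines[j].strip() == "$$":
--             inner = "\n".join(buf).strip()
--             out.append((i, j + 1, inner))
--             i = j + 1
--             continue
--         # Unclosed $$, stop scanning
--         break
--     return out
-- ===== SOURCE B (Python) =====
-- def _iter_display_math_blocks(md: str) -> list[tuple[int, int, str]]:
--     s = (md or "").replace("\r\n", "\n").replace("\r", "\n")
--     if not s.strip():
--         return []
--     lines = s.split("\n")
--     markers = [i for i, ln in enumerate(lines) if ln.strip() == "$$"]
--     out: list[tuple[int, int, str]] = []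
--     ms = markers
--     while len(ms) >= 2:
--         i, j = ms[0], ms[1]
--         out.append((i, j + 1, "\n".join(lines[i + 1:j]).strip()))
--         ms = ms[2:]
--     return out
-- ===== Notes on version B (the rewrite author's own statement) =====
-- stated objective: simpler
-- what changed: Replaces A's nested while-loop scanner (index cursor plus inner buffer-collecting loop) by collecting all math-delimiter line indices once with a comprehension and then pairing them two at a time, slicing the inner text directly from the line list.
import Mathlib
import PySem

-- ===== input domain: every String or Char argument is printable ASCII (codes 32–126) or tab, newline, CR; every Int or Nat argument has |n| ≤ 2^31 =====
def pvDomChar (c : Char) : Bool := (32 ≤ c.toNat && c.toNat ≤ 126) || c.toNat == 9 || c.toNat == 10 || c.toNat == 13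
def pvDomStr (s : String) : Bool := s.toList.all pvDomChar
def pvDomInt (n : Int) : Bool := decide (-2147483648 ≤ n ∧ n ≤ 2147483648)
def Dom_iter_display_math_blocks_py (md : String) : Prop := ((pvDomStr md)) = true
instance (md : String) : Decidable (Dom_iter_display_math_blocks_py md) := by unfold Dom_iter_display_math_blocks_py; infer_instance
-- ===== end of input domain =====

-- B replaces A's nested while-loop scanner by collecting all '$$' marker line
-- indices once and pairing them two at a time (objective: simpler).

-- ===== PORT A =====

-- lines[k].strip() == "$$"
def pvIsMark (l : String) : Bool := PySem.Str.strip l == "$$"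

-- A's inner while loop: collect buf and the stopping index j
def pvInnerA (lines : List String) (j : Nat) : List String × Nat :=
  if h : j < lines.length then
    if pvIsMark lines[j] then ([], j)
    else
      let r := pvInnerA lines (j + 1)
      (lines[j] :: r.1, r.2)
  else ([], j)
termination_by lines.length - j

theorem pvInnerA_ge (lines : List String) (j : Nat) : j ≤ (pvInnerA lines j).2 := by
  unfold pvInnerA
  split
  · split
    · simp
    · simp only
      have := pvInnerA_ge lines (j + 1)
      omega
  · simp
termination_by lines.length - j

-- A's outer while loop over the cursor i
def pvScanA (lines : List String) (i : Nat) : List (Int × Int × String) :=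
  if h : i < lines.length then
    if pvIsMark lines[i] then
      let r := pvInnerA lines (i + 1)
      if hj : r.2 < lines.length then
        ((i : Int), (r.2 : Int) + 1, PySem.Str.strip (PySem.Str.join "\n" r.1)) :: pvScanA lines (r.2 + 1)
      else []
    else pvScanA lines (i + 1)
  else []
termination_by lines.length - i
decreasing_by
  · have := pvInnerA_ge lines (i + 1); omega
  · omega

def iter_display_math_blocks_py (md : String) : List (Int × Int × String) :=
  let s := PySem.Str.replace (PySem.Str.replace (if md == "" then "" else md) "\r\n" "\n") "\r" "\n"
  if PySem.Str.strip s == "" then []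
  else pvScanA ((PySem.Str.split? s "\n").getD []) 0

-- ===== PORT B =====

-- pair the marker indices two at a time, slicing the inner text from lines
def pvPairsB (ms : List Int) (lines : List String) : List (Int × Int × String) :=
  match ms with
  | i :: j :: rest =>
      (i, j + 1, PySem.Str.strip (PySem.Str.join "\n" (PySem.List.slice lines (some (i + 1)) (some j)))) ::
        pvPairsB rest lines
  | _ => []

def iter_display_math_blocks_py_alt (md : String) : List (Int × Int × String) :=
  let s := PySem.Str.replace (PySem.Str.replace (if md == "" then "" else md) "\r\n" "\n") "\r" "\n"
  if PySem.Str.strip s == "" then []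
  else
    let lines := (PySem.Str.split? s "\n").getD []
    let markers := ((PySem.List.enumerate lines 0).filter (fun p => pvIsMark p.2)).map (·.1)
    pvPairsB markers lines

-- ===== PRECONDITION & SPEC =====
def Spec_iter_display_math_blocks_py (md : String) (out : List (Int × Int × String)) : Prop := out = iter_display_math_blocks_py_alt md
instance (md : String) (out : List (Int × Int × String)) : Decidable (Spec_iter_display_math_blocks_py md out) := by unfold Spec_iter_display_math_blocks_py; infer_instance

-- ===== CLAIM (what is proved, stated in full; the proofs are below) =====
def Claim_equal_iter_display_math_blocks_py : Prop := ∀ (md : String), Dom_iter_display_math_blocks_py md → Spec_iter_display_math_blocks_py md (iter_display_math_blocks_py md)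

-- ===== LEMMAS AND PROOFS =====

-- marker indices of lines from position i on
def pvMF (lines : List String) (i : Nat) : List Int :=
  if h : i < lines.length then
    (if pvIsMark lines[i] then [(i : Int)] else []) ++ pvMF lines (i + 1)
  else []
termination_by lines.length - i

theorem pvEnum_cons {α : Type} (x : α) (xs : List α) (s : Int) :
    PySem.List.enumerate (x :: xs) s = (s, x) :: PySem.List.enumerate xs (s + 1) := rfl

theorem pvMF_drop (lines : List String) (i : Nat) (h : i ≤ lines.length) :
    pvMF lines i = ((PySem.List.enumerate (lines.drop i) i).filter (fun p => pvIsMark p.2)).map (·.1) := by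
  unfold pvMF
  split
  · rename_i h1
    rw [List.drop_eq_getElem_cons h1, pvEnum_cons]
    have hcast : ((i : Int) + 1) = ((i + 1 : Nat) : Int) := by push_cast; ring
    rw [hcast]
    by_cases hm : pvIsMark lines[i]
    · simp [hm, pvMF_drop lines (i + 1) (by omega)]
    · simp [hm, pvMF_drop lines (i + 1) (by omega)]
  · rename_i h1
    have : lines.drop i = [] := List.drop_eq_nil_of_le (by omega)
    simp [this]
termination_by lines.length - i

theorem pvMF_zero (lines : List String) :
    pvMF lines 0 = ((PySem.List.enumerate lines 0).filter (fun p => pvIsMark p.2)).map (·.1) := by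
  simpa using pvMF_drop lines 0 (by omega)

theorem pvMF_stop (lines : List String) (i : Nat) (h : lines.length ≤ i) : pvMF lines i = [] := by
  unfold pvMF; simp [Nat.not_lt.mpr h]

theorem pvMF_mark (lines : List String) (i : Nat) (h : i < lines.length) (hm : pvIsMark lines[i]) :
    pvMF lines i = (i : Int) :: pvMF lines (i + 1) := by
  rw [pvMF]; simp [h, hm]

theorem pvMF_skip (lines : List String) (i : Nat) (h : i < lines.length) (hm : ¬ pvIsMark lines[i]) :
    pvMF lines i = pvMF lines (i + 1) := by
  rw [pvMF]; simp [h, hm]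

theorem pvInnerA_char (lines : List String) (j : Nat) (hj : j ≤ lines.length) :
    (pvInnerA lines j).2 ≤ lines.length ∧
    (pvInnerA lines j).1 = (lines.drop j).take ((pvInnerA lines j).2 - j) ∧
    pvMF lines j = pvMF lines (pvInnerA lines j).2 ∧
    (∀ h2 : (pvInnerA lines j).2 < lines.length, pvIsMark lines[(pvInnerA lines j).2]) := by
  unfold pvInnerA
  split
  · rename_i h1
    by_cases hm : pvIsMark lines[j]
    · simp [hm]
      omega
    · simp only [hm, Bool.false_eq_true, if_false]
      obtain ⟨ih1, ih2, ih3, ih4⟩ := pvInnerA_char lines (j + 1) (by omega)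
      have hge := pvInnerA_ge lines (j + 1)
      refine ⟨ih1, ?_, ?_, ih4⟩
      · rw [List.drop_eq_getElem_cons h1, ih2]
        have h2 : (pvInnerA lines (j + 1)).2 - j = ((pvInnerA lines (j + 1)).2 - (j + 1)) + 1 := by omega
        rw [h2, List.take_succ_cons]
      · rw [← ih3, pvMF_skip lines _ h1 hm]
  · rename_i h1
    have hd : lines.drop j = [] := List.drop_eq_nil_of_le (by omega)
    refine ⟨by simpa using hj, by simp [hd], rfl, ?_⟩
    intro h2
    exact absurd h2 h1
termination_by lines.length - j

theorem pvScan_eq_pairs (lines : List String) (i : Nat) :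
    pvScanA lines i = pvPairsB (pvMF lines i) lines := by
  unfold pvScanA
  split
  · rename_i h1
    by_cases hm : pvIsMark lines[i]
    · simp only [hm, if_true]
      obtain ⟨c1, c2, c3, c4⟩ := pvInnerA_char lines (i + 1) (by omega)
      have hge := pvInnerA_ge lines (i + 1)
      rw [pvMF_mark lines i h1 hm, c3]
      split
      · rename_i hj
        rw [pvMF_mark lines _ hj (c4 hj)]
        simp only [pvPairsB]
        have hsl : PySem.List.slice lines (some ((i : Int) + 1)) (some (((pvInnerA lines (i + 1)).2 : Nat) : Int)) = (lines.drop (i + 1)).take ((pvInnerA lines (i + 1)).2 - (i + 1)) := by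
          have hc : ((i : Int) + 1) = ((i + 1 : Nat) : Int) := by push_cast; ring
          rw [hc, PySem.List.slice_natCast]
        rw [hsl, ← c2, pvScan_eq_pairs lines ((pvInnerA lines (i + 1)).2 + 1)]
      · rename_i hj
        rw [pvMF_stop lines _ (by omega)]
        simp [pvPairsB]
    · simp only [hm, Bool.false_eq_true, if_false]
      rw [pvMF_skip lines _ h1 hm, pvScan_eq_pairs lines (i + 1)]
  · rw [pvMF_stop lines _ (by omega)]
    rfl
termination_by lines.length - i
decreasing_by
  · omega
  · omega

-- ===== VERDICT (by name: the statement is the Claim_ definition above) =====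
theorem iter_display_math_blocks_py_spec : Claim_equal_iter_display_math_blocks_py := by
  intro md _
  unfold Spec_iter_display_math_blocks_py iter_display_math_blocks_py iter_display_math_blocks_py_alt
  simp only
  split
  · rfl
  · rw [pvScan_eq_pairs, pvMF_zero]
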